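-- pv_equiv track=rewrite | github.com/xieyuen/MCDR-Plugins | src/MCDRpost/mcdrpost/utils/version.py | __compare_pre_release
-- ===== SOURCE A (Python) =====
-- def __compare_pre_release(pre1: str, pre2: str) -> bool:
--     """比较预发布版本号"""
--     parts1 = pre1.split(".")
--     parts2 = pre2.split(".")
--
--     for p1, p2 in zip(parts1, parts2):
--         # 尝试转换为数字比较，否则按字符串比较
--         try:
--             num1, num2 = int(p1), int(p2)
--             if num1 != num2:
--                 return num1 < num2
--         except ValueError:
--             if p1 != p2:
--                 return p1 < p2
--
--     # 如果共同部分都相同，长度短的更小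
--     return len(parts1) < len(parts2)
-- ===== SOURCE B (Python) =====
-- def __compare_pre_release(pre1: str, pre2: str) -> bool:
--     """比较预发布版本号"""
--     parts1 = pre1.split(".")
--     parts2 = pre2.split(".")
--
--     keys1, keys2 = [], []
--     for p1, p2 in zip(parts1, parts2):
--         try:
--             k1, k2 = int(p1), int(p2)
--         except ValueError:
--             k1, k2 = p1, p2
--         keys1.append(k1)
--         keys2.append(k2)
--
--     return (keys1, len(parts1)) < (keys2, len(parts2))
-- ===== Notes on version B (the rewrite author's own statement) =====
-- stated objective: idiomatic
-- what changed: Replaces A's early-return per-position branching with building two aligned comparison-key lists (int where both parts parse, else the raw strings) and a single lexicographic tuple comparison (keys1, len1) < (keys2, len2).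
import Mathlib
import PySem

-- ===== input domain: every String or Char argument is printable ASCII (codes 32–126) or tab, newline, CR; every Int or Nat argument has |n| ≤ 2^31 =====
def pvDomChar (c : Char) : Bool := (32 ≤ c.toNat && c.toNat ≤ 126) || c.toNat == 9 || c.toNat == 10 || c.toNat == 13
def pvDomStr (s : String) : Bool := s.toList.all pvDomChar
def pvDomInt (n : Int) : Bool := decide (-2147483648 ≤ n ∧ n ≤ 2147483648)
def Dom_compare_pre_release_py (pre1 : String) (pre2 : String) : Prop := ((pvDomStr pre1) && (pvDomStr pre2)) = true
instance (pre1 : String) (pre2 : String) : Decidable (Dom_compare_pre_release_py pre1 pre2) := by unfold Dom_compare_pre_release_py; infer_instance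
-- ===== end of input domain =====

-- B builds aligned comparison-key lists once and compares (keys1, len1) < (keys2, len2)
-- lexicographically instead of A's early-return per-position branching (objective: idiomatic build-then-compare decomposition).

-- ===== PORT A =====
-- A's for-loop with its early returns: none = the loop fell through.
def pvALoop : List (List Char × List Char) → Option Bool
  | [] => none
  | (p1, p2) :: rest =>
    match PySem.Int.ofChars? p1, PySem.Int.ofChars? p2 with
    | some n1, some n2 =>
        if n1 ≠ n2 then some (decide (n1 < n2)) else pvALoop rest
    | _, _ =>
        if p1 ≠ p2 then some (decide (p1 < p2)) else pvALoop rest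

def compare_pre_release_py (pre1 : String) (pre2 : String) : Bool :=
  let parts1 := PySem.Chars.splitOn pre1.toList ['.']
  let parts2 := PySem.Chars.splitOn pre2.toList ['.']
  match pvALoop (parts1.zip parts2) with
  | some b => b
  | none => decide (parts1.length < parts2.length)

-- ===== PORT B =====
-- a comparison key is either the parsed int or the raw part
inductive PvKey
  | i : Int → PvKey
  | s : List Char → PvKey
deriving DecidableEq, Repr

-- Python's '<' on a pair of aligned key lists (elementwise; keys are aligned in type by construction)
def pvKeyLt : PvKey → PvKey → Bool
  | .i a, .i b => decide (a < b)
  | .s a, .s b => decide (a < b)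
  | _, _ => false

-- Python's lexicographic list '<'
def pvListLt : List PvKey → List PvKey → Bool
  | [], [] => false
  | [], _ :: _ => true
  | _ :: _, [] => false
  | a :: as, b :: bs => if a = b then pvListLt as bs else pvKeyLt a b

-- the loop of B: build both key lists in one pass over the zipped parts
def pvKeys : List (List Char × List Char) → List PvKey × List PvKey
  | [] => ([], [])
  | (p1, p2) :: rest =>
    let ks := pvKeys rest
    match PySem.Int.ofChars? p1, PySem.Int.ofChars? p2 with
    | some n1, some n2 => (PvKey.i n1 :: ks.1, PvKey.i n2 :: ks.2)
    | _, _ => (PvKey.s p1 :: ks.1, PvKey.s p2 :: ks.2)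

def compare_pre_release_py_alt (pre1 : String) (pre2 : String) : Bool :=
  let parts1 := PySem.Chars.splitOn pre1.toList ['.']
  let parts2 := PySem.Chars.splitOn pre2.toList ['.']
  let ks := pvKeys (parts1.zip parts2)
  -- tuple comparison (keys1, len1) < (keys2, len2)
  if ks.1 = ks.2 then decide (parts1.length < parts2.length) else pvListLt ks.1 ks.2

-- ===== PRECONDITION & SPEC =====
def Spec_compare_pre_release_py (pre1 : String) (pre2 : String) (out : Bool) : Prop := out = compare_pre_release_py_alt pre1 pre2
instance (pre1 : String) (pre2 : String) (out : Bool) : Decidable (Spec_compare_pre_release_py pre1 pre2 out) := by unfold Spec_compare_pre_release_py; infer_instance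

-- ===== CLAIM (what is proved, stated in full; the proofs are below) =====
def Claim_equal_compare_pre_release_py : Prop := ∀ (pre1 : String) (pre2 : String), Dom_compare_pre_release_py pre1 pre2 → Spec_compare_pre_release_py pre1 pre2 (compare_pre_release_py pre1 pre2)

-- ===== LEMMAS AND PROOFS =====
-- A's early-return loop (with the length tiebreak as fallback) equals B's build-then-compare.
theorem pvLoop_eq_keys (zs : List (List Char × List Char)) (tb : Bool) :
    (match pvALoop zs with | some b => b | none => tb)
      = (if (pvKeys zs).1 = (pvKeys zs).2 then tb else pvListLt (pvKeys zs).1 (pvKeys zs).2) := by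
  induction zs with
  | nil => simp [pvALoop, pvKeys]
  | cons hd rest ih =>
    obtain ⟨p1, p2⟩ := hd
    simp only [pvALoop, pvKeys]
    cases h1 : PySem.Int.ofChars? p1 <;> cases h2 : PySem.Int.ofChars? p2
    · by_cases hp : p1 = p2 <;> simp [hp, pvListLt, pvKeyLt, ih]
    · by_cases hp : p1 = p2 <;> simp [hp, pvListLt, pvKeyLt, ih]
    · by_cases hp : p1 = p2 <;> simp [hp, pvListLt, pvKeyLt, ih]
    · rename_i n1 n2
      by_cases hn : n1 = n2 <;> simp [hn, pvListLt, pvKeyLt, ih]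

-- ===== VERDICT (by name: the statement is the Claim_ definition above) =====
theorem compare_pre_release_py_spec : Claim_equal_compare_pre_release_py := by
  intro pre1 pre2 _
  unfold Spec_compare_pre_release_py compare_pre_release_py compare_pre_release_py_alt
  exact pvLoop_eq_keys _ _
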